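-- pv_equiv track=rewrite | github.com/pajon3/python_katowice_11012020 | Dzien_3/Funkcje/zad7.py | add_dots
-- ===== SOURCE A (Python) =====
-- def add_dots(napis):
--     nowy_napis= ""
--     for i in range(0,len(napis)):
--         if napis[i] != ".":
--            if i == len(napis)-1:
--                nowy_napis += napis[i]
--            else:
--                 nowy_napis += napis[i] +"."
--     return nowy_napis
-- ===== SOURCE B (Python) =====
-- def add_dots(napis):
--     chars = [c for c in napis if c != '.']
--     out = '.'.join(chars)
--     if chars and napis.endswith('.'):
--         out += '.'
--     return out
-- ===== Notes on version B (the rewrite author's own statement) =====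
-- stated objective: idiomatic
-- what changed: B removes the dots first, then joins the surviving characters with a dot separator via str.join (n-1 separators, so no per-index last-element branch and no trimming), finally appending one dot exactly when the input ends in a dot and some character survived; the single join also replaces A's repeated string concatenation.
import Mathlib
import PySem

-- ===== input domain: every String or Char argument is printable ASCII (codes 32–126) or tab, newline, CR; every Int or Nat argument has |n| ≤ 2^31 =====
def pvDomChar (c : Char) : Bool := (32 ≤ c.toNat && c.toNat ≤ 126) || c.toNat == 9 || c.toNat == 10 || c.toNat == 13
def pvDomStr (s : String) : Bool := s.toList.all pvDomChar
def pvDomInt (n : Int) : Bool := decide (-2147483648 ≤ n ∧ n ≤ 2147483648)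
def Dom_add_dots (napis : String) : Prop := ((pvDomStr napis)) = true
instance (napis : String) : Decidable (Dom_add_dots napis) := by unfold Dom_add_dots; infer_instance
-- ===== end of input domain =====

-- B removes the dots, joins the surviving characters with '.' as a separator, and appends one
-- dot exactly when the input ends in '.' and a character survived; objective: idiomatic.


-- ===== PORT A =====
-- for i in range(0, len(napis)): if napis[i] != "." then append napis[i] (+".") depending on i == len-1
def add_dots (napis : String) : String :=
  let l := napis.toList
  let nowy :=
    (PySem.List.pyRange 0 (l.length : Int) 1).foldl (fun acc i =>
      match PySem.List.pyGet? l i with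
      | none => acc        -- unreachable: i ranges over valid indices
      | some c =>
        if c ≠ '.' then
          if i = (l.length : Int) - 1 then acc ++ [c] else acc ++ [c, '.']
        else acc) []
  String.ofList nowy

-- ===== PORT B =====
-- chars = [c for c in napis if c != '.']; out = '.'.join(chars); if chars and napis.endswith('.'): out += '.'
def add_dots_alt (napis : String) : String :=
  let chars := napis.toList.filter (fun c => c ≠ '.')
  let out := PySem.Chars.join ['.'] (chars.map (fun c => [c]))
  if chars ≠ [] ∧ PySem.Str.endswith napis "." = true then String.ofList (out ++ ['.'])
  else String.ofList out

-- ===== PRECONDITION & SPEC =====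
def Spec_add_dots (napis : String) (out : String) : Prop := out = add_dots_alt napis
instance (napis : String) (out : String) : Decidable (Spec_add_dots napis out) := by unfold Spec_add_dots; infer_instance

-- ===== CLAIM (what is proved, stated in full; the proofs are below) =====
def Claim_equal_add_dots : Prop := ∀ (napis : String), Dom_add_dots napis → Spec_add_dots napis (add_dots napis)

-- ===== LEMMAS AND PROOFS =====

-- A's loop body with a Nat index (what the pyRange fold becomes after pyRange_one / pyGet?_natCast)
def stepN (l : List Char) (acc : List Char) (k : Nat) : List Char :=
  match l[k]? with
  | none => acc
  | some c =>
    if c ≠ '.' then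
      if (k : Int) = (l.length : Int) - 1 then acc ++ [c] else acc ++ [c, '.']
    else acc

-- structural characterisation of A's output
def gA : List Char → List Char
  | [] => []
  | c :: rest =>
      (if c ≠ '.' then (if rest = [] then [c] else [c, '.']) else []) ++ gA rest

theorem foldA_eq_gA (l : List Char) : ∀ acc,
    (List.range l.length).foldl (stepN l) acc = acc ++ gA l := by
  induction l with
  | nil => intro acc; simp [gA]
  | cons c rest ih =>
    intro acc
    rw [List.length_cons, List.range_succ_eq_map, List.foldl_cons, List.foldl_map]
    have hf : (fun (acc : List Char) (k : Nat) => stepN (c :: rest) acc (k + 1)) = stepN rest := by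
      funext acc k
      simp only [stepN, List.getElem?_cons_succ, List.length_cons]
      rcases rest[k]? with _ | d
      · rfl
      · have : ((k : Int) + 1 = (rest.length : Int) + 1 - 1) ↔ ((k : Int) = (rest.length : Int) - 1) := by omega
        simp only [Nat.cast_add, Nat.cast_one, this]
    rw [hf, ih]
    have h0 : stepN (c :: rest) acc 0 =
        acc ++ (if c ≠ '.' then (if rest = [] then [c] else [c, '.']) else []) := by
      simp only [stepN, List.getElem?_cons_zero, List.length_cons, Nat.cast_zero]
      have : ((0 : Int) = (rest.length : Int) + 1 - 1) ↔ rest = [] := by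
        rw [List.eq_nil_iff_length_eq_zero]; omega
      rw [Nat.cast_add, Nat.cast_one, if_congr this rfl rfl]
      split_ifs <;> simp
    rw [h0, gA, List.append_assoc]

-- B's value as a function of the character list
def gB (l : List Char) : List Char :=
  let f := l.filter (fun c => c ≠ '.')
  PySem.Chars.join ['.'] (f.map (fun c => [c])) ++
    (if f ≠ [] ∧ l.getLast? = some '.' then ['.'] else [])

-- the uniform "dot after every kept char" word
def FB (l : List Char) : List Char :=
  (l.filter (fun c => c ≠ '.')).flatMap (fun c => [c, '.'])

-- FB equals A's result plus the dot that depends on the last character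
theorem FB_eq_gA (l : List Char) :
    FB l = gA l ++ (match l.getLast? with
                    | some c => if c = '.' then [] else ['.']
                    | none => []) := by
  induction l with
  | nil => simp [FB, gA]
  | cons c rest ih =>
    have hstep : FB (c :: rest) = (if c ≠ '.' then [c, '.'] else []) ++ FB rest := by
      by_cases h : c = '.' <;> simp [FB, h]
    cases rest with
    | nil =>
      rw [hstep]
      simp only [FB, List.filter_nil, List.flatMap_nil, List.append_nil, List.getLast?_singleton]
      by_cases h : c = '.' <;> simp [gA, h]
    | cons d t =>
      rw [hstep, ih, List.getLast?_cons_cons]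
      by_cases hc : c = '.' <;> simp [gA, hc, List.append_assoc]

-- joining with '.' and appending one dot is the uniform word, for a nonempty list
theorem join_append_dot (f : List Char) (hf : f ≠ []) :
    PySem.Chars.join ['.'] (f.map (fun c => [c])) ++ ['.'] =
      f.flatMap (fun c => [c, '.']) := by
  induction f with
  | nil => exact absurd rfl hf
  | cons c t ih =>
    cases t with
    | nil => simp [PySem.Chars.join_singleton]
    | cons d u =>
      rw [List.map_cons, List.map_cons, PySem.Chars.join_cons_cons]
      have hih := ih (by simp)
      rw [List.map_cons] at hih
      simp only [List.append_assoc]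
      rw [hih]
      simp

theorem gA_eq_gB (l : List Char) : gA l = gB l := by
  have hFB := FB_eq_gA l
  show gA l = PySem.Chars.join ['.'] ((l.filter (fun c => c ≠ '.')).map (fun c => [c])) ++
    (if l.filter (fun c => c ≠ '.') ≠ [] ∧ l.getLast? = some '.' then ['.'] else [])
  by_cases hf : l.filter (fun c => c ≠ '.') = []
  · -- nothing survives: both sides are empty
    have hFBnil : FB l = [] := by unfold FB; rw [hf]; rfl
    rw [hFBnil] at hFB
    have hga : gA l = [] := (List.append_eq_nil_iff.mp hFB.symm).1
    rw [hga, hf]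
    simp [PySem.Chars.join_nil]
  · -- something survives, so l ≠ [] and l.getLast? is some character a
    have hlne : l ≠ [] := by
      intro h; exact hf (by simp [h])
    obtain ⟨a, ha⟩ : ∃ a, l.getLast? = some a := by
      cases h : l.getLast? with
      | none => exact absurd (List.getLast?_eq_none_iff.mp h) hlne
      | some a => exact ⟨a, rfl⟩
    rw [ha] at hFB
    by_cases hadot : a = '.'
    · -- ends in a dot: B appends its extra dot, and FB l = gA l
      rw [if_pos ⟨hf, by rw [ha, hadot]⟩, join_append_dot _ hf]
      have hFB' : FB l = gA l := by
        rw [hadot] at hFB; simpa using hFB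
      unfold FB at hFB'
      exact hFB'.symm
    · -- ends in a non-dot: B appends nothing, and FB l = gA l ++ ['.']
      rw [if_neg (by rintro ⟨-, h⟩; rw [ha] at h; exact hadot (Option.some_inj.mp h))]
      have hFB' : FB l = gA l ++ ['.'] := by
        simp only [hadot] at hFB
        simpa using hFB
      have hjoin := join_append_dot (l.filter (fun c => c ≠ '.')) hf
      unfold FB at hFB'
      rw [hFB'] at hjoin
      rw [List.append_nil]
      exact (List.append_cancel_right hjoin).symm

-- ".".toList is the one-char suffix test: it holds iff the last character is '.'
theorem suffix_dot_iff (s : List Char) : ".".toList <:+ s ↔ s.getLast? = some '.' := by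
  have h : ".".toList = ['.'] := rfl
  rw [h]
  constructor
  · rintro ⟨t, rfl⟩; simp
  · intro h'
    obtain ⟨l', rfl⟩ := List.getLast?_eq_some_iff.mp h'
    exact ⟨l', rfl⟩

-- B's port, expressed through gB
theorem alt_characterisation (napis : String) :
    add_dots_alt napis = String.ofList (gB napis.toList) := by
  have hend : PySem.Str.endswith napis "." = true ↔ napis.toList.getLast? = some '.' := by
    rw [PySem.Str.endswith_eq, PySem.Chars.endswith_iff]
    exact suffix_dot_iff napis.toList
  simp only [add_dots_alt, gB]
  split_ifs with h1 h2 h2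
  · simp
  · exact absurd ⟨h1.1, hend.mp h1.2⟩ h2
  · exact absurd ⟨h2.1, hend.mpr h2.2⟩ h1
  · simp

theorem add_dots_spec : Claim_equal_add_dots := by
  intro napis _
  unfold Spec_add_dots
  rw [alt_characterisation]
  unfold add_dots
  simp only []
  set l := napis.toList with hl
  have hfold :
      (PySem.List.pyRange 0 (l.length : Int) 1).foldl (fun acc i =>
        match PySem.List.pyGet? l i with
        | none => acc
        | some c =>
          if c ≠ '.' then
            if i = (l.length : Int) - 1 then acc ++ [c] else acc ++ [c, '.']
          else acc) [] = gA l := by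
    rw [PySem.List.pyRange_one, List.foldl_map]
    have : (fun (acc : List Char) (k : Nat) =>
        match PySem.List.pyGet? l ((0 : Int) + (k : Int)) with
        | none => acc
        | some c =>
          if c ≠ '.' then
            if (0 : Int) + (k : Int) = (l.length : Int) - 1 then acc ++ [c] else acc ++ [c, '.']
          else acc) = stepN l := by
      funext acc k
      simp only [zero_add, PySem.List.pyGet?_natCast, stepN]
    rw [this]
    have hlen : ((l.length : Int) - 0).toNat = l.length := by omega
    rw [hlen, foldA_eq_gA l []]
    rfl
  rw [hfold, gA_eq_gB]
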